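-- pv_equiv track=rewrite | github.com/ZHE-SAPI/CostFilter-AD | Costfilter_HVQ_trans/Costfilter_HVQtrans/Costfilter_HVQ_mvtec/experiments/MVTec-AD/main_multi_glad_dino_3d_anomaldino_num4.py | get_object_name_from_path
-- ===== SOURCE A (Python) =====
-- def get_object_name_from_path(instance_images_paths, masking_default):
--     """
--     从图像路径中提取 object_name，匹配 masking_default 字典中的键。
--
--     Args:
--         instance_images_paths (list): 包含图像路径的列表。
--         masking_default (dict): 包含 object_name 及其对应 masking 值的字典。
--
--     Returns:
--         list: 包含匹配 object_name 的列表。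
--     """
--     object_names = []
--     # 遍历所有路径
--     for path in instance_images_paths:
--         matched = False
--         for key in masking_default.keys():
--             if f"/{key}/" in path:  # 判断路径中是否包含 key
--                 object_names.append(key)
--                 matched = True
--                 break  # 找到匹配的 key 就退出当前循环
--         if not matched:
--             object_names.append(None)  # 如果没有匹配项，追加 None
--
--     return object_names
-- ===== SOURCE B (Python) =====
-- def get_object_name_from_path(instance_images_paths, masking_default):
--     # Loop-interchanged rewrite: iterate keys (outer, in reverse dict order) and
--     # rebuild the result list, so an earlier key's match overwrites a later one's;
--     # the final value per path is the first key in dict order whose "/key/" occurs.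
--     object_names = [None] * len(instance_images_paths)
--     for key in reversed(list(masking_default.keys())):
--         needle = f"/{key}/"
--         object_names = [key if needle in path else cur
--                         for path, cur in zip(instance_images_paths, object_names)]
--     return object_names
-- ===== Notes on version B (the rewrite author's own statement) =====
-- stated objective: alternative
-- what changed: Interchanged the loops: instead of scanning the keys with a break for each path, B iterates the keys once in reverse order and rebuilds the whole result list per key, so the first matching key in dict order is whatever survives the overwrites.
import Mathlib
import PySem

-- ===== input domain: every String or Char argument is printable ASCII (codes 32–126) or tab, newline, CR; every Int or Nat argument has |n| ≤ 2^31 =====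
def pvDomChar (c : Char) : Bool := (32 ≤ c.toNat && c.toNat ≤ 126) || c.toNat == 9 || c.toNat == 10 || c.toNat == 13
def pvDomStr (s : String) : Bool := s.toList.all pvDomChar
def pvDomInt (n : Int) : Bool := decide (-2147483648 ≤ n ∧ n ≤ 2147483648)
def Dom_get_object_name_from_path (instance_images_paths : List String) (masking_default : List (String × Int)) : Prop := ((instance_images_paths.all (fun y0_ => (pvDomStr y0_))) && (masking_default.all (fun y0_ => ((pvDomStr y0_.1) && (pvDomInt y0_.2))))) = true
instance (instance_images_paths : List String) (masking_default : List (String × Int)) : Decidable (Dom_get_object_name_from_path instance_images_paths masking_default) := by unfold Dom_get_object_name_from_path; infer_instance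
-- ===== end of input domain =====

-- B interchanges the loops: keys outer (reversed), rebuilding the result list per key so overwrites realise first-match; same cost, alternative structure.


-- ===== PORT A =====
-- f"/{key}/" in path  (shared primitive wrapper for Python's substring test)
def pvMatch (key path : String) : Bool :=
  PySem.Chars.isIn ('/' :: key.toList ++ ['/']) path.toList

-- inner 'for key in masking_default.keys(): … break' with the matched flag:
-- returns the first matching key, or none
def pvFirstKey (keys : List String) (path : String) : Option String :=
  match keys with
  | [] => none
  | k :: ks => if pvMatch k path then some k else pvFirstKey ks path

def get_object_name_from_path (instance_images_paths : List String) (masking_default : List (String × Int)) : List (Option String) :=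
  instance_images_paths.foldl
    (fun object_names path => object_names ++ [pvFirstKey (PySem.Dict.keys (PySem.Dict.ofList masking_default)) path])
    []

-- ===== PORT B =====
def get_object_name_from_path_alt (instance_images_paths : List String) (masking_default : List (String × Int)) : List (Option String) :=
  ((PySem.Dict.keys (PySem.Dict.ofList masking_default)).reverse).foldl
    (fun object_names key =>
      List.zipWith (fun path cur => if pvMatch key path then some key else cur)
        instance_images_paths object_names)
    (instance_images_paths.map (fun _ => none))

-- ===== PRECONDITION & SPEC =====
def Spec_get_object_name_from_path (instance_images_paths : List String) (masking_default : List (String × Int)) (out : List (Option String)) : Prop := out = get_object_name_from_path_alt instance_images_paths masking_default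
instance (instance_images_paths : List String) (masking_default : List (String × Int)) (out : List (Option String)) : Decidable (Spec_get_object_name_from_path instance_images_paths masking_default out) := by unfold Spec_get_object_name_from_path; infer_instance

-- ===== CLAIM (what is proved, stated in full; the proofs are below) =====
def Claim_equal_get_object_name_from_path : Prop := ∀ (instance_images_paths : List String) (masking_default : List (String × Int)), Dom_get_object_name_from_path instance_images_paths masking_default → Spec_get_object_name_from_path instance_images_paths masking_default (get_object_name_from_path instance_images_paths masking_default)

-- ===== LEMMAS AND PROOFS =====

-- zipping a list with a mapped copy of itself is a single map
theorem pv_zipWith_map_self {α β γ : Type} (g : α → β → γ) (h : α → β) :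
    ∀ (xs : List α),
      List.zipWith g xs (xs.map h) = xs.map (fun x => g x (h x)) := by
  intro xs
  induction xs with
  | nil => rfl
  | cons x t ih => simp [ih]

-- folding the per-key overwrite over the reversed keys computes first-match per path
theorem pv_foldr_keys (paths : List String) :
    ∀ (keys : List String),
      keys.reverse.foldl
        (fun object_names key =>
          List.zipWith (fun path cur => if pvMatch key path then some key else cur)
            paths object_names)
        (paths.map (fun _ => none))
      = paths.map (fun p => pvFirstKey keys p) := by
  intro keys
  rw [List.foldl_reverse]
  induction keys with
  | nil => rfl
  | cons k ks ih =>
    simp only [List.foldr_cons, ih, pv_zipWith_map_self]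
    rfl

-- ===== VERDICT (by name: the statement is the Claim_ definition above) =====
theorem get_object_name_from_path_spec : Claim_equal_get_object_name_from_path := by
  intro paths md _
  unfold Spec_get_object_name_from_path get_object_name_from_path get_object_name_from_path_alt
  rw [PySem.List.foldl_append_singleton_eq_map, List.nil_append, pv_foldr_keys]
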